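-- pv_equiv track=rewrite | github.com/JordanSecDev/Vanta-Tools | Device Monitoring.py | consolidate_by_email
-- ===== SOURCE A (Python) =====
-- from typing import Any, Dict, Iterable, List, Optional, Tuple
--
-- def consolidate_by_email(raw_rows: List[Dict[str, Any]], workspace_names: List[str]) -> Tuple[List[Dict[str, Any]], List[str]]:
--     """
--     Returns consolidated rows keyed by email, with per-workspace status columns.
--     """
--     by_email: Dict[str, Dict[str, Any]] = {}
--
--     for r in raw_rows:
--         email = (r.get("emailAddress") or "").strip().lower()
--         if not email:
--             continue
--
--         if email not in by_email:
--             by_email[email] = {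
--                 "emailAddress": email,
--                 "name_display": r.get("name_display"),
--                 "employment_status_any": r.get("employment_status"),
--             }
--
--         ws = r["workspace"]
--         by_email[email][f"{ws}__installDeviceMonitoring_status"] = r.get("installDeviceMonitoring_status")
--         by_email[email][f"{ws}__installDeviceMonitoring_completionDate"] = r.get("installDeviceMonitoring_completionDate")
--
--     # Build field list
--     fields = ["emailAddress", "name_display", "employment_status_any"]
--     for ws in workspace_names:
--         fields.extend([
--             f"{ws}__installDeviceMonitoring_status",
--             f"{ws}__installDeviceMonitoring_completionDate",
--         ])
--
--     rows = list(by_email.values())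
--     rows.sort(key=lambda x: x["emailAddress"])
--     return rows, fields
-- ===== SOURCE B (Python) =====
-- def consolidate_by_email(raw_rows, workspace_names):
--     # Phase 1: group kept rows by normalized email (insertion order), one pass.
--     groups = {}
--     for r in raw_rows:
--         email = (r.get("emailAddress") or "").strip().lower()
--         if email:
--             groups.setdefault(email, []).append(r)
--     # Phase 2: build one output row per group, iterating groups in sorted key order
--     # (so no final sort of dict rows is needed).
--     rows = []
--     for email in sorted(groups):
--         grp = groups[email]
--         first = grp[0]
--         row = {
--             "emailAddress": email,
--             "name_display": first.get("name_display"),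
--             "employment_status_any": first.get("employment_status"),
--         }
--         for r in grp:
--             ws = r["workspace"]
--             row[f"{ws}__installDeviceMonitoring_status"] = r.get("installDeviceMonitoring_status")
--             row[f"{ws}__installDeviceMonitoring_completionDate"] = r.get("installDeviceMonitoring_completionDate")
--         rows.append(row)
--     fields = ["emailAddress", "name_display", "employment_status_any"] + [
--         f"{ws}__installDeviceMonitoring_{part}"
--         for ws in workspace_names
--         for part in ("status", "completionDate")
--     ]
--     return rows, fields
-- ===== Notes on version B (the rewrite author's own statement) =====
-- stated objective: alternative
-- what changed: A interleaves creating and updating one consolidated dict per email in a single pass and finally sorts the built rows by a key lambda; B first groups the raw rows into lists by normalized email, then builds each output row from its group (first row gives name/employment, later rows overwrite the workspace columns) while iterating the group keys in sorted order, so no sort of built rows is needed.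
import Mathlib
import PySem

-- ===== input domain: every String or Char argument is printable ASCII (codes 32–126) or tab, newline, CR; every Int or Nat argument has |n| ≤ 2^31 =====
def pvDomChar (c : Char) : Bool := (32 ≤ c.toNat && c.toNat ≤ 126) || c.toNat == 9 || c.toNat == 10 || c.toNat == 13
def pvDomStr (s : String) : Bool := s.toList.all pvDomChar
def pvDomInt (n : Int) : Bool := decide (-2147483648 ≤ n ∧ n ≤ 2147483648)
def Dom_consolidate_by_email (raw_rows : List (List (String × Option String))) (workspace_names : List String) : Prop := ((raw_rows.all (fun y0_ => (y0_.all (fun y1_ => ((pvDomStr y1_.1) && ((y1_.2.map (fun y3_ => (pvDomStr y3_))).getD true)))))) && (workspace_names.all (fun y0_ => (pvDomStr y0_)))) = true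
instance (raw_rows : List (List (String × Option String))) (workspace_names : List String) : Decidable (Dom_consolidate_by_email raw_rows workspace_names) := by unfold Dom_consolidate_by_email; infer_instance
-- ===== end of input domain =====

-- B restructures A as two phases — group the kept rows by email, then build each output row from
-- its group in sorted-key order (no final sort of built rows) — same return value (objective: alternative).

-- ===== shared helpers (expressions both Pythons contain verbatim) =====
-- r.get(k): missing key and a stored None both give None
def pvGet (r : List (String × Option String)) (k : String) : Option String :=
  ((PySem.Dict.ofList r).get? k).join

-- (r.get("emailAddress") or "").strip().lower()
def pvEmail (r : List (String × Option String)) : String :=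
  PySem.Str.lower (PySem.Str.strip ((((PySem.Dict.ofList r).get? "emailAddress").join).getD ""))

-- f"{r['workspace']}": the stored string, or "None" for a stored None; on a MISSING key Python
-- raises KeyError (excluded by Pre_ below), the port's "None" there is arbitrary
def pvWs (r : List (String × Option String)) : String :=
  match (PySem.Dict.ofList r).get? "workspace" with
  | some (some s) => s
  | some none => "None"
  | none => "None"

-- the base row {"emailAddress": …, "name_display": …, "employment_status_any": …}
def pvBase (email : String) (r : List (String × Option String)) : PySem.Dict String (Option String) :=
  PySem.Dict.mk [("emailAddress", some email),
                 ("name_display", pvGet r "name_display"),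
                 ("employment_status_any", pvGet r "employment_status")]

-- ===== PORT A =====
-- x["emailAddress"] as sort key; the stored value is always `some email`, so .getD flattens to that string
def pvSortKeyA (x : PySem.Dict String (Option String)) : String :=
  (x.getD "emailAddress" none).getD ""

-- the body of A's single 'for r in raw_rows' loop
def pvStepA (d : PySem.Dict String (PySem.Dict String (Option String))) (r : List (String × Option String)) : PySem.Dict String (PySem.Dict String (Option String)) :=
  let email := pvEmail r
  if email = "" then d
  else
    let d := if d.contains email then d else d.insert email (pvBase email r)
    let ws := pvWs r
    let d := d.modify email PySem.Dict.empty
      (fun row => row.insert (ws ++ "__installDeviceMonitoring_status") (pvGet r "installDeviceMonitoring_status"))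
    d.modify email PySem.Dict.empty
      (fun row => row.insert (ws ++ "__installDeviceMonitoring_completionDate") (pvGet r "installDeviceMonitoring_completionDate"))

def consolidate_by_email (raw_rows : List (List (String × Option String))) (workspace_names : List String) : (List (List (String × Option String))) × List String :=
  let by_email := raw_rows.foldl pvStepA PySem.Dict.empty
  let fields :=
    workspace_names.foldl (fun acc ws =>
        acc ++ [ws ++ "__installDeviceMonitoring_status", ws ++ "__installDeviceMonitoring_completionDate"])
      ["emailAddress", "name_display", "employment_status_any"]
  let rows := PySem.List.sorted by_email.values pvSortKeyA false
  (rows.map (fun x => x.items), fields)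

-- ===== PORT B =====
-- phase-1 body: groups.setdefault(email, []).append(r) (after the email guard)
def pvStepB (g : PySem.Dict String (List (List (String × Option String)))) (r : List (String × Option String)) : PySem.Dict String (List (List (String × Option String))) :=
  let email := pvEmail r
  if email = "" then g else g.modify email [] (fun l => l ++ [r])

-- the inner 'for r in grp' body: set the two workspace columns
def pvIns2 (row : PySem.Dict String (Option String)) (r : List (String × Option String)) : PySem.Dict String (Option String) :=
  let ws := pvWs r
  (row.insert (ws ++ "__installDeviceMonitoring_status") (pvGet r "installDeviceMonitoring_status")).insert
    (ws ++ "__installDeviceMonitoring_completionDate") (pvGet r "installDeviceMonitoring_completionDate")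

-- phase 2 for one group: base row from the first row (grp is nonempty by construction), then the two columns per row
def pvBuildRow (email : String) (grp : List (List (String × Option String))) : PySem.Dict String (Option String) :=
  grp.foldl pvIns2 (pvBase email (grp.headD []))

def consolidate_by_email_alt (raw_rows : List (List (String × Option String))) (workspace_names : List String) : (List (List (String × Option String))) × List String :=
  let groups := raw_rows.foldl pvStepB PySem.Dict.empty
  let rows :=
    (PySem.List.sorted groups.keys (fun e => e) false).foldl
      (fun rows email => rows ++ [(pvBuildRow email (groups.getD email [])).items]) []
  let fields :=
    ["emailAddress", "name_display", "employment_status_any"] ++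
      workspace_names.flatMap (fun ws =>
        ["status", "completionDate"].map (fun part => ws ++ "__installDeviceMonitoring_" ++ part))
  (rows, fields)

-- ===== PRECONDITION & SPEC =====
-- Pre_ excludes exactly the inputs where A raises KeyError: a row whose normalized email is
-- nonempty but which has no "workspace" key (B raises KeyError on the same inputs).
def Pre_consolidate_by_email (raw_rows : List (List (String × Option String))) (workspace_names : List String) : Prop :=
  ∀ r ∈ raw_rows, pvEmail r = "" ∨ (PySem.Dict.ofList r).contains "workspace" = true
instance (raw_rows : List (List (String × Option String))) (workspace_names : List String) : Decidable (Pre_consolidate_by_email raw_rows workspace_names) := by unfold Pre_consolidate_by_email; infer_instance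

def pvWitness_consolidate_by_email : (List (List (String × Option String))) × List String :=
  ([[("emailAddress", some " B@x.com "), ("workspace", some "w1"), ("installDeviceMonitoring_status", some "ok")],
    [("emailAddress", some "a@x.com"), ("workspace", none), ("name_display", some "Al")]],
   ["w1", "None"])

def Spec_consolidate_by_email (raw_rows : List (List (String × Option String))) (workspace_names : List String) (out : (List (List (String × Option String))) × List String) : Prop := out = consolidate_by_email_alt raw_rows workspace_names
instance (raw_rows : List (List (String × Option String))) (workspace_names : List String) (out : (List (List (String × Option String))) × List String) : Decidable (Spec_consolidate_by_email raw_rows workspace_names out) := by unfold Spec_consolidate_by_email; infer_instance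

-- ===== CLAIM (what is proved, stated in full; the proofs are below) =====
def Claim_equal_consolidate_by_email : Prop := ∀ (raw_rows : List (List (String × Option String))) (workspace_names : List String), Dom_consolidate_by_email raw_rows workspace_names → Pre_consolidate_by_email raw_rows workspace_names → Spec_consolidate_by_email raw_rows workspace_names (consolidate_by_email raw_rows workspace_names)

-- ===== LEMMAS AND PROOFS =====

-- A's dict-in-progress, expressed through B's grouping dict
def pvAB (g : PySem.Dict String (List (List (String × Option String)))) : PySem.Dict String (PySem.Dict String (Option String)) :=
  PySem.Dict.mk (g.items.map (fun p => (p.1, pvBuildRow p.1 p.2)))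

def pvGood (g : PySem.Dict String (List (List (String × Option String)))) : Prop :=
  g.keys.Nodup ∧ ∀ p ∈ g.items, p.2 ≠ []

theorem pvAB_items (g : PySem.Dict String (List (List (String × Option String)))) :
    (pvAB g).items = g.items.map (fun p => (p.1, pvBuildRow p.1 p.2)) := rfl

theorem pvAB_keys (g : PySem.Dict String (List (List (String × Option String)))) : (pvAB g).keys = g.keys := by
  simp [pvAB, PySem.Dict.keys]

theorem pvAB_contains (g : PySem.Dict String (List (List (String × Option String)))) (e : String) :
    (pvAB g).contains e = g.contains e := by
  rw [PySem.Dict.contains_eq_decide_mem_keys, PySem.Dict.contains_eq_decide_mem_keys, pvAB_keys]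

theorem pvModify_modify {ν : Type} (d : PySem.Dict String ν) (k : String) (d0 : ν) (f h : ν → ν) :
    (d.modify k d0 f).modify k d0 h = d.modify k d0 (fun x => h (f x)) := by
  simp [PySem.Dict.modify, PySem.Dict.getD_insert_self, PySem.Dict.insert_insert_self]

theorem pvBuildRow_append (e : String) (grp : List (List (String × Option String))) (r : List (String × Option String)) (hne : grp ≠ []) :
    pvBuildRow e (grp ++ [r]) = pvIns2 (pvBuildRow e grp) r := by
  cases grp with
  | nil => exact absurd rfl hne
  | cons a t => simp [pvBuildRow, List.foldl_append]

theorem pvBuildRow_single (e : String) (r : List (String × Option String)) :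
    pvBuildRow e [r] = pvIns2 (pvBase e r) r := by
  simp [pvBuildRow]

theorem pvItems_eq (g : PySem.Dict String (List (List (String × Option String)))) {e : String} {v : List (List (String × Option String))}
    (hnd : g.keys.Nodup) (hv : (e, v) ∈ g.items) {p : String × List (List (String × Option String))}
    (hp : p ∈ g.items) (hpe : p.1 = e) : p = (e, v) := by
  have h1 : g.get? e = some v := (PySem.Dict.get?_eq_some_iff_mem_items g e v hnd).mpr hv
  have h2 : g.get? p.1 = some p.2 := (PySem.Dict.get?_eq_some_iff_mem_items g p.1 p.2 hnd).mpr (by simpa using hp)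
  rw [hpe, h1] at h2
  have h3 : v = p.2 := by injection h2
  exact Prod.ext hpe h3.symm

theorem pvStep (g : PySem.Dict String (List (List (String × Option String)))) (r : List (String × Option String)) (hg : pvGood g) :
    pvStepA (pvAB g) r = pvAB (pvStepB g r) ∧ pvGood (pvStepB g r) := by
  unfold pvStepA pvStepB
  by_cases he : pvEmail r = ""
  · rw [if_pos he, if_pos he]
    exact ⟨rfl, hg⟩
  · simp only [if_neg he]
    rw [pvAB_contains]
    by_cases hc : g.contains (pvEmail r) = true
    · simp only [hc, if_pos, pvModify_modify]
      obtain ⟨v, hv⟩ : ∃ v, g.get? (pvEmail r) = some v := by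
        have h := PySem.Dict.contains_eq_isSome_get? g (pvEmail r)
        rw [hc] at h
        cases hvv : g.get? (pvEmail r) with
        | none => rw [hvv] at h; simp at h
        | some v => exact ⟨v, rfl⟩
      have hvm : (pvEmail r, v) ∈ g.items := PySem.Dict.mem_items_of_get?_eq_some g hv
      have hvne : v ≠ [] := hg.2 _ hvm
      have hgd : g.getD (pvEmail r) [] = v := by rw [PySem.Dict.getD_eq_get?_getD, hv]; rfl
      have habgd : (pvAB g).getD (pvEmail r) PySem.Dict.empty = pvBuildRow (pvEmail r) v :=
        PySem.Dict.getD_of_mem_items (pvAB g)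
          (List.mem_map.mpr ⟨(pvEmail r, v), hvm, rfl⟩) ((pvAB_keys g) ▸ hg.1) _
      have hcAB : (pvAB g).contains (pvEmail r) = true := by rw [pvAB_contains]; exact hc
      refine ⟨?_, ?_, ?_⟩
      · apply PySem.Dict.ext
        simp only [PySem.Dict.modify, habgd, hgd]
        rw [PySem.Dict.items_insert_of_contains _ _ hcAB, pvAB_items, pvAB_items,
          PySem.Dict.items_insert_of_contains _ _ hc, List.map_map, List.map_map]
        apply List.map_congr_left
        intro p hp
        by_cases hpe : p.1 = pvEmail r
        · have hpv := pvItems_eq g hg.1 hvm hp hpe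
          rw [hpv]
          simp [pvBuildRow_append _ _ _ hvne, pvIns2]
        · simp [hpe]
      · simp only [PySem.Dict.modify]
        rw [PySem.Dict.keys_insert_of_contains _ _ hc]
        exact hg.1
      · intro p hp
        simp only [PySem.Dict.modify] at hp
        rw [PySem.Dict.items_insert_of_contains _ _ hc] at hp
        obtain ⟨q, hq, rfl⟩ := List.mem_map.mp hp
        by_cases hqe : (q.1 == pvEmail r) = true
        · simp [hqe]
        · simp only [hqe, if_neg, Bool.false_eq_true, not_false_eq_true]
          exact hg.2 _ hq
    · have hc' : g.contains (pvEmail r) = false := by simpa using hc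
      simp only [hc', if_neg, Bool.false_eq_true, not_false_eq_true, pvModify_modify]
      have hcAB : (pvAB g).contains (pvEmail r) = false := by rw [pvAB_contains]; exact hc'
      refine ⟨?_, ?_, ?_⟩
      · apply PySem.Dict.ext
        simp only [PySem.Dict.modify, PySem.Dict.getD_insert_self, PySem.Dict.insert_insert_self,
          PySem.Dict.getD_of_not_contains _ _ hc', List.nil_append]
        rw [PySem.Dict.items_insert_of_not_contains _ _ hcAB, pvAB_items, pvAB_items,
          PySem.Dict.items_insert_of_not_contains _ _ hc']
        simp [pvBuildRow_single, pvIns2]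
      · simp only [PySem.Dict.modify, PySem.Dict.getD_of_not_contains _ _ hc', List.nil_append]
        rw [PySem.Dict.keys_insert_of_not_contains _ _ hc']
        have hnm : pvEmail r ∉ g.keys := by
          have h := PySem.Dict.contains_eq_decide_mem_keys g (pvEmail r)
          rw [hc'] at h
          simpa using h.symm
        simp [List.nodup_append, hg.1]
        intro a ha h
        exact hnm (h ▸ ha)
      · intro p hp
        simp only [PySem.Dict.modify, PySem.Dict.getD_of_not_contains _ _ hc', List.nil_append] at hp
        rw [PySem.Dict.items_insert_of_not_contains _ _ hc'] at hp
        rcases List.mem_append.mp hp with h | h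
        · exact hg.2 _ h
        · simp at h
          rw [h]
          simp

theorem pvLoop (l : List (List (String × Option String))) (g : PySem.Dict String (List (List (String × Option String)))) (hg : pvGood g) :
    l.foldl pvStepA (pvAB g) = pvAB (l.foldl pvStepB g) ∧ pvGood (l.foldl pvStepB g) := by
  induction l generalizing g with
  | nil => exact ⟨rfl, hg⟩
  | cons r t ih =>
    obtain ⟨h1, h2⟩ := pvStep g r hg
    simpa only [List.foldl_cons, h1] using ih _ h2

theorem pvNe1 (ws : String) : ws ++ "__installDeviceMonitoring_status" ≠ "emailAddress" := by
  intro h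
  have := congrArg (fun s => s.toList.length) h
  simp at this

theorem pvNe2 (ws : String) : ws ++ "__installDeviceMonitoring_completionDate" ≠ "emailAddress" := by
  intro h
  have := congrArg (fun s => s.toList.length) h
  simp at this

theorem pvRow_email (grp : List (List (String × Option String))) (row : PySem.Dict String (Option String)) (w : Option String)
    (h : row.getD "emailAddress" none = w) : (grp.foldl pvIns2 row).getD "emailAddress" none = w := by
  induction grp generalizing row with
  | nil => simpa using h
  | cons a t ih =>
    refine ih _ ?_
    simp only [pvIns2]
    rw [PySem.Dict.getD_insert_of_ne _ _ _ (by intro h; exact pvNe2 (pvWs a) h.symm),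
        PySem.Dict.getD_insert_of_ne _ _ _ (by intro h; exact pvNe1 (pvWs a) h.symm)]
    exact h

theorem pvSortKey_buildRow (e : String) (grp : List (List (String × Option String))) :
    pvSortKeyA (pvBuildRow e grp) = e := by
  unfold pvSortKeyA pvBuildRow
  rw [pvRow_email grp _ (some e) (by simp [pvBase, PySem.Dict.getD_eq_get?_getD, PySem.Dict.get?_mk_cons])]
  rfl

theorem pvFlattenSingleton {α β : Type} (f : α → β) (l : List α) :
    (List.map (fun x => [f x]) l).flatten = List.map f l := by
  induction l with
  | nil => rfl
  | cons a t ih => simp [ih]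

theorem pvRows_eq (g : PySem.Dict String (List (List (String × Option String)))) (hg : pvGood g) :
    (PySem.List.sorted (pvAB g).values pvSortKeyA false).map (fun x => x.items)
      = (PySem.List.sorted g.keys (fun e => e) false).foldl
          (fun rows email => rows ++ [(pvBuildRow email (g.getD email [])).items]) [] := by
  have hkeys : g.keys = g.items.map (fun p => p.1) := rfl
  have hperm : (PySem.List.sorted g.items (fun p => p.1) false).Perm g.items := PySem.List.sorted_perm _ _ _
  have hndk : ((PySem.List.sorted g.items (fun p => p.1) false).map (fun p => p.1)).Nodup :=
    ((hperm.map _).nodup_iff).mpr (hkeys ▸ hg.1)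
  have hle : (PySem.List.sorted g.items (fun p => p.1) false).Pairwise (fun p q => p.1 ≤ q.1) :=
    PySem.List.sorted_pairwise _ _
  have hne : (PySem.List.sorted g.items (fun p => p.1) false).Pairwise (fun p q => p.1 ≠ q.1) :=
    List.pairwise_map.mp hndk
  have hlt : (PySem.List.sorted g.items (fun p => p.1) false).Pairwise (fun p q => p.1 < q.1) :=
    (hle.and hne).imp (fun h => lt_of_le_of_ne h.1 h.2)
  have hvals : (pvAB g).values = g.items.map (fun p => pvBuildRow p.1 p.2) := by
    simp [pvAB, PySem.Dict.values_mk]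
  have hA : PySem.List.sorted (pvAB g).values pvSortKeyA false
      = (PySem.List.sorted g.items (fun p => p.1) false).map (fun p => pvBuildRow p.1 p.2) := by
    rw [hvals]
    refine PySem.List.sorted_eq_of_perm_of_pairwise_lt _ _ _ (hperm.map _) ?_
    refine List.pairwise_map.mpr (hlt.imp ?_)
    intro a b h
    simpa [pvSortKey_buildRow] using h
  have hB : PySem.List.sorted g.keys (fun e => e) false
      = (PySem.List.sorted g.items (fun p => p.1) false).map (fun p => p.1) := by
    rw [hkeys]
    exact PySem.List.sorted_eq_of_perm_of_pairwise_lt _ _ _ (hperm.map _) (List.pairwise_map.mpr hlt)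
  rw [hA, hB, List.map_map, List.foldl_map]
  rw [PySem.List.foldl_congr_mem' _ _ (fun rows p => rows ++ [(pvBuildRow p.1 p.2).items]) []
    (by
      intro p hp acc
      have hpm : p ∈ g.items := (PySem.List.mem_sorted _ _ _ _).mp hp
      have : g.getD p.1 [] = p.2 := PySem.Dict.getD_of_mem_items g (by simpa using hpm) hg.1 []
      rw [this])]
  simp [Function.comp_def, pvFlattenSingleton]

theorem pvFields_eq (workspace_names : List String) :
    workspace_names.foldl (fun acc ws =>
        acc ++ [ws ++ "__installDeviceMonitoring_status", ws ++ "__installDeviceMonitoring_completionDate"])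
      ["emailAddress", "name_display", "employment_status_any"]
    = ["emailAddress", "name_display", "employment_status_any"] ++
        workspace_names.flatMap (fun ws =>
          ["status", "completionDate"].map (fun part => ws ++ "__installDeviceMonitoring_" ++ part)) := by
  rw [PySem.List.foldl_append_eq_flatMap
    (g := fun ws => [ws ++ "__installDeviceMonitoring_status", ws ++ "__installDeviceMonitoring_completionDate"])]
  congr 1
  refine List.flatMap_congr (fun ws _ => ?_)
  simp only [List.map_cons, List.map_nil]
  rw [String.append_assoc, String.append_assoc,
      show ("__installDeviceMonitoring_" ++ "status" : String) = "__installDeviceMonitoring_status" from rfl,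
      show ("__installDeviceMonitoring_" ++ "completionDate" : String) = "__installDeviceMonitoring_completionDate" from rfl]

-- ===== VERDICT (by name: the statement is the Claim_ definition above) =====
theorem consolidate_by_email_spec : Claim_equal_consolidate_by_email := by
  intro raw_rows workspace_names _ _
  have hempty : pvGood (PySem.Dict.empty) := ⟨List.nodup_nil, by intro p hp; simp [PySem.Dict.empty] at hp⟩
  have hAB0 : (PySem.Dict.empty : PySem.Dict String (PySem.Dict String (Option String))) = pvAB PySem.Dict.empty := rfl
  obtain ⟨h1, h2⟩ := pvLoop raw_rows PySem.Dict.empty hempty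
  unfold Spec_consolidate_by_email consolidate_by_email consolidate_by_email_alt
  dsimp only
  rw [hAB0, h1, pvRows_eq _ h2, pvFields_eq]
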